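-- pv_equiv track=rewrite | github.com/dpoisson2017/ift-7025-tp3 | load_datasets.py | splitInFolds
-- ===== SOURCE A (Python) =====
-- def splitInFolds(records, numberFolds):
--     numberRecords = len(records)
--     average = numberRecords // numberFolds
--     remainder = numberRecords % numberFolds
--     result = []
--     start = 0
--     for i in range(numberFolds):
--         end = start + average + (i < remainder)
--         result.append(records[start:end])
--         start = end
--     return result
-- ===== SOURCE B (Python) =====
-- def splitInFolds(records, numberFolds):
--     average, remainder = divmod(len(records), numberFolds)
--     sizes = [average + 1] * remainder + [average] * (numberFolds - remainder)
--     it = iter(records)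
--     return [[next(it) for _ in range(size)] for size in sizes]
-- ===== Notes on version B (the rewrite author's own statement) =====
-- stated objective: alternative
-- what changed: Two staged passes with a different data flow: first build the explicit list of fold sizes ([average+1]*remainder + [average]*(numberFolds-remainder)), then consume the records once through an iterator, materialising each fold by pulling size elements with next() -- no index arithmetic and no slicing at all.
import Mathlib
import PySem

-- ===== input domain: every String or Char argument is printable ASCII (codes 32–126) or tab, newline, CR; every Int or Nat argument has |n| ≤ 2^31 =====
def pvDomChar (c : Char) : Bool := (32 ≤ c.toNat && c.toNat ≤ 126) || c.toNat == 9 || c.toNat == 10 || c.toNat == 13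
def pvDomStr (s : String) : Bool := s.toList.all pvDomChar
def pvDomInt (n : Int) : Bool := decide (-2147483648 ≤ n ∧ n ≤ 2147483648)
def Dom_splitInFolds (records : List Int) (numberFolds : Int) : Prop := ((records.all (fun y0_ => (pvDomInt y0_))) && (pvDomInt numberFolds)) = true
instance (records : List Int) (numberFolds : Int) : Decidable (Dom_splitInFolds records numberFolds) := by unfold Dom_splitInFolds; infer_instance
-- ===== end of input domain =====

-- B replaces A's running-offset slicing loop by two staged passes: build the list of
-- fold sizes first, then consume the records once through an iterator (take/drop),
-- with no index arithmetic and no slicing: alternative decomposition, same cost.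


-- ===== PORT A =====
def splitInFolds (records : List Int) (numberFolds : Int) : List (List Int) :=
  let numberRecords : Int := records.length
  let average := PySem.Int.floordiv numberRecords numberFolds
  let remainder := PySem.Int.mod numberRecords numberFolds
  let st := (PySem.List.pyRange 0 numberFolds 1).foldl
    (fun (s : List (List Int) × Int) i =>
      let e := s.2 + average + (if i < remainder then 1 else 0)
      (s.1 ++ [PySem.List.slice records (some s.2) (some e)], e))
    ([], 0)
  st.1

-- ===== PORT B =====
-- each '[next(it) for _ in range(size)]' pulls size elements off the iterator:
-- the fold taken is 'take size', the advanced iterator is 'drop size'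
def pvChunksFromIter (sizes : List Int) (xs : List Int) : List (List Int) :=
  match sizes with
  | [] => []
  | s :: rest => xs.take s.toNat :: pvChunksFromIter rest (xs.drop s.toNat)

def splitInFolds_alt (records : List Int) (numberFolds : Int) : List (List Int) :=
  let average := PySem.Int.floordiv records.length numberFolds
  let remainder := PySem.Int.mod records.length numberFolds
  -- Python '[x] * k' with k ≤ 0 is []: replicate k.toNat
  let sizes := List.replicate remainder.toNat (average + 1)
              ++ List.replicate (numberFolds - remainder).toNat average
  pvChunksFromIter sizes records

-- ===== PRECONDITION & SPEC =====
-- Python A raises ZeroDivisionError exactly when numberFolds = 0.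
def Pre_splitInFolds (records : List Int) (numberFolds : Int) : Prop := numberFolds ≠ 0
instance (records : List Int) (numberFolds : Int) : Decidable (Pre_splitInFolds records numberFolds) := by unfold Pre_splitInFolds; infer_instance
def pvWitness_splitInFolds : List Int × Int := ([1, 2, 3, 4, 5], 2)

def Spec_splitInFolds (records : List Int) (numberFolds : Int) (out : List (List Int)) : Prop := out = splitInFolds_alt records numberFolds
instance (records : List Int) (numberFolds : Int) (out : List (List Int)) : Decidable (Spec_splitInFolds records numberFolds out) := by unfold Spec_splitInFolds; infer_instance

-- ===== CLAIM (what is proved, stated in full; the proofs are below) =====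
def Claim_equal_splitInFolds : Prop := ∀ (records : List Int) (numberFolds : Int), Dom_splitInFolds records numberFolds → Pre_splitInFolds records numberFolds → Spec_splitInFolds records numberFolds (splitInFolds records numberFolds)

-- ===== LEMMAS AND PROOFS =====

-- A's slicing fold over any list of nonnegative sizes is B's iterator consumption.
lemma fold_slices_eq_chunks (records : List Int) :
    ∀ (sizes : List Int) (acc : List (List Int)) (start : Int), 0 ≤ start →
      (∀ s ∈ sizes, 0 ≤ s) →
      (sizes.foldl
        (fun (st : List (List Int) × Int) sz =>
          (st.1 ++ [PySem.List.slice records (some st.2) (some (st.2 + sz))], st.2 + sz))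
        (acc, start)).1
      = acc ++ pvChunksFromIter sizes (records.drop start.toNat) := by
  intro sizes
  induction sizes with
  | nil => intro acc start _ _; simp [pvChunksFromIter]
  | cons s rest ih =>
      intro acc start hstart hnn
      have hs : 0 ≤ s := hnn s (by simp)
      simp only [List.foldl_cons]
      rw [ih _ (start + s) (by omega) (fun x hx => hnn x (by simp [hx]))]
      rw [PySem.List.slice_toNat records hstart (by omega : (0:Int) ≤ start + s)]
      have h1 : (start + s).toNat - start.toNat = s.toNat := by omega
      have h2 : (start + s).toNat = s.toNat + start.toNat := by omega
      rw [h1, h2, ← List.drop_drop]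
      simp only [pvChunksFromIter, List.append_assoc, List.cons_append, List.nil_append]
      congr 2
      rw [List.drop_drop, List.drop_drop, Nat.add_comm]

-- the per-index size list of A is B's replicate-built size list
lemma sizes_map_eq (avg : Int) (r : Nat) :
    ∀ n : Nat,
      (List.range n).map (fun k => avg + if k < r then (1:Int) else 0)
      = List.replicate (min n r) (avg + 1) ++ List.replicate (n - r) avg := by
  intro n
  induction n with
  | zero => simp
  | succ n ih =>
      rw [List.range_succ, List.map_append, ih]
      by_cases h : n < r
      · simp only [List.map_cons, List.map_nil, if_pos h]
        rw [min_eq_left (by omega), min_eq_left (by omega),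
            Nat.sub_eq_zero_of_le (by omega), Nat.sub_eq_zero_of_le (by omega)]
        simp [List.replicate_succ']
      · simp only [List.map_cons, List.map_nil, if_neg h]
        rw [min_eq_right (by omega), min_eq_right (by omega)]
        have : n + 1 - r = (n - r) + 1 := by omega
        rw [this, List.replicate_succ']
        simp [List.append_assoc]

-- ===== VERDICT (by name: the statement is the Claim_ definition above) =====
theorem splitInFolds_spec : Claim_equal_splitInFolds := by
  unfold Claim_equal_splitInFolds Pre_splitInFolds Spec_splitInFolds
  intro records nf _ hnf
  unfold splitInFolds splitInFolds_alt
  rcases lt_trichotomy nf 0 with h | h | h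
  · -- nf < 0: A's range is empty; B's size list is empty
    rw [PySem.List.pyRange_one_eq_nil (by omega)]
    have hmod := PySem.Int.mod_neg_bounds (records.length : Int) h
    have ha : (PySem.Int.mod (records.length : Int) nf).toNat = 0 := by omega
    have hb : (nf - PySem.Int.mod (records.length : Int) nf).toNat = 0 := by omega
    simp [ha, hb, pvChunksFromIter]
  · exact absurd h hnf
  · -- nf > 0
    have havg : 0 ≤ PySem.Int.floordiv (records.length : Int) nf := by
      rw [PySem.Int.floordiv_eq_ediv_of_pos h]
      exact Int.ediv_nonneg (by positivity) (by omega)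
    have hrem0 : 0 ≤ PySem.Int.mod (records.length : Int) nf := by
      rw [PySem.Int.mod_eq_emod_of_pos h]; exact Int.emod_nonneg _ (by omega)
    have hremlt : PySem.Int.mod (records.length : Int) nf < nf := by
      rw [PySem.Int.mod_eq_emod_of_pos h]; exact Int.emod_lt_of_pos _ h
    set avg := PySem.Int.floordiv (records.length : Int) nf with havgdef
    set rem := PySem.Int.mod (records.length : Int) nf with hremdef
    rw [PySem.List.pyRange_one]
    simp only [sub_zero, zero_add]
    -- turn A's index fold into a fold over the size list
    have hmap :
        ((List.range nf.toNat).map (fun (k : Nat) => (k : Int))).foldl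
          (fun (s : List (List Int) × Int) i =>
            (s.1 ++ [PySem.List.slice records (some s.2)
                     (some (s.2 + avg + if i < rem then 1 else 0))],
             s.2 + avg + if i < rem then 1 else 0))
          (([] : List (List Int)), (0 : Int))
        = ((List.range nf.toNat).map
            (fun k => avg + if k < rem.toNat then (1:Int) else 0)).foldl
            (fun (st : List (List Int) × Int) sz =>
              (st.1 ++ [PySem.List.slice records (some st.2) (some (st.2 + sz))],
               st.2 + sz))
            (([] : List (List Int)), (0 : Int)) := by
      rw [List.foldl_map, List.foldl_map]
      apply PySem.List.foldl_congr_mem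
      intro st k _
      have : ((k : Int) < rem) = (k < rem.toNat) := by
        apply propext; omega
      simp only [this, add_assoc]
    rw [hmap]
    rw [fold_slices_eq_chunks records _ _ 0 le_rfl
        (by intro s hs; simp only [List.mem_map] at hs; obtain ⟨k, _, hk⟩ := hs
            split_ifs at hk <;> omega)]
    rw [sizes_map_eq avg rem.toNat nf.toNat,
        min_eq_right (by omega : rem.toNat ≤ nf.toNat),
        show nf.toNat - rem.toNat = (nf - rem).toNat from by omega]
    rfl
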